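-- pv_equiv track=rewrite | github.com/bufordsharkley/advent_of_code | 2016/day7.py | is_valid_two
-- ===== SOURCE A (Python) =====
-- def separate(string):
--     outsides = []
--     insides = []
--     while '[' in string:
--         before, inside_bracket = string.split('[', 1)
--         outsides.append(before)
--         inside_bracket, string = inside_bracket.split(']', 1)
--         insides.append(inside_bracket)
--     outsides.append(string)
--     return outsides, insides
--
-- def find_all_abas(string):
--     return [string[ii:ii + 3] for ii, x in enumerate(string[:-2])
--             if string[ii + 2] == x and x != string[ii + 1]]
--
-- def is_valid_two(string):
--     outsides, insides = separate(string)
--     all_abas, all_babs = set(), set()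
--     for outside in outsides:
--         all_abas.update(find_all_abas(outside))
--     for inside in insides:
--         all_babs.update(find_all_abas(inside))
--     return True if set(reverse(x) for x in all_abas) & all_babs else False
--
-- def reverse(x):
--     return ''.join([x[1], x[0], x[1]])
-- ===== SOURCE B (Python) =====
-- def is_valid_two(string):
--     inside = False
--     p2 = p1 = None
--     abas = set()
--     babs = set()
--     for c in string:
--         if (not inside and c == '[') or (inside and c == ']'):
--             inside = not inside
--             p2 = p1 = None
--         else:
--             if p2 is not None and p2 == c and p2 != p1:
--                 (babs if inside else abas).add((p2, p1))
--             p2, p1 = p1, c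
--     return any((b, a) in babs for (a, b) in abas)
-- ===== Notes on version B (the rewrite author's own statement) =====
-- stated objective: faster
-- what changed: B replaces A's multi-pass pipeline (split the string into outside/inside segment lists, scan every segment for ABA triples, build sets and intersect a reversed set) by one left-to-right character scan that keeps an inside-bracket flag and the last two characters of the current segment, collecting (a,b) pairs into two sets as it goes; the constant-factor win comes from touching each character once with no intermediate segment lists or triple strings. Pre_ excludes the strings with an unclosed opening bracket, on which A raises ValueError; …
import Mathlib
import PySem

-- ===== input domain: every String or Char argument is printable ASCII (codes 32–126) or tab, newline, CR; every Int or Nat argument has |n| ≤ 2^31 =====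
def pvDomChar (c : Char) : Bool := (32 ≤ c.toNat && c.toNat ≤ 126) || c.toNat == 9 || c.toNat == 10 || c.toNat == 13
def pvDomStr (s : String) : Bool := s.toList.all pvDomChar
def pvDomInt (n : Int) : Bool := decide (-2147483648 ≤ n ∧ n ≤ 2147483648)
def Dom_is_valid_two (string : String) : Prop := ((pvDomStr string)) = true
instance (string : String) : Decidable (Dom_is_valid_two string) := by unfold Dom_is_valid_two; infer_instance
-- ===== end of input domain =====

-- B replaces A's split-into-segments-then-scan-then-intersect pipeline by one left-to-right
-- scan keeping an inside-bracket flag and the last two characters of the current segment.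


-- ===== PORT A =====
-- 'separate': the while-loop, fueled (each iteration removes the '[' and the ']', so
-- string.length + 1 units of fuel never run out); 'none' is Python's ValueError from the
-- 2-way unpacking of split(']', 1) when ']' is missing after a '['.
def separateGo : Nat → List Char → Option (List (List Char) × List (List Char))
  | 0, s => some ([s], [])   -- unreachable with fuel = length + 1
  | fuel+1, s =>
    if PySem.Chars.isIn ['['] s then          -- while '[' in string
      match PySem.Chars.splitOnMax s ['['] 1 with    -- string.split('[', 1)
      | [before, rest] =>
        match PySem.Chars.splitOnMax rest [']'] 1 with   -- inside_bracket.split(']', 1)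
        | [insideSeg, s'] => (separateGo fuel s').map (fun oi => (before :: oi.1, insideSeg :: oi.2))
        | _ => none   -- ']' not found: Python raises ValueError here
      | _ => none     -- unreachable: '[' ∈ s gives exactly two pieces
    else some ([s], [])

def separate (s : List Char) : Option (List (List Char) × List (List Char)) :=
  separateGo (s.length + 1) s

def find_all_abas (s : List Char) : List (List Char) :=
  (PySem.List.enumerate (PySem.List.slice s none (some (-2)))).filterMap
    (fun p => if PySem.List.pyGetD s (p.1 + 2) ' ' = p.2 ∧ p.2 ≠ PySem.List.pyGetD s (p.1 + 1) ' '
      then some (PySem.List.slice s (some p.1) (some (p.1 + 3))) else none)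

def pyreverse (x : List Char) : List Char :=
  [PySem.List.pyGetD x 1 ' ', PySem.List.pyGetD x 0 ' ', PySem.List.pyGetD x 1 ' ']

def is_valid_two (string : String) : Bool :=
  match separate string.toList with
  | none => false   -- Python raises ValueError here; excluded by Pre_
  | some (outsides, insides) =>
    let all_abas := outsides.foldl (fun acc o => PySem.Set.update acc (find_all_abas o)) PySem.Set.empty
    let all_babs := insides.foldl (fun acc i => PySem.Set.update acc (find_all_abas i)) PySem.Set.empty
    if PySem.Set.inter (PySem.Set.ofList (all_abas.map pyreverse)) all_babs = [] then false else true

-- ===== PORT B =====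
def bstep (st : Bool × Option Char × Option Char × PySem.Set (Char × Char) × PySem.Set (Char × Char))
    (c : Char) : Bool × Option Char × Option Char × PySem.Set (Char × Char) × PySem.Set (Char × Char) :=
  match st with
  | (inside, p2, p1, abas, babs) =>
    if (!inside && c == '[') || (inside && c == ']') then
      (!inside, none, none, abas, babs)
    else
      match p2, p1 with
      | some a, some b =>
        if a == c && a != b then
          if inside then (inside, p1, some c, abas, PySem.Set.add babs (a, b))
          else (inside, p1, some c, PySem.Set.add abas (a, b), babs)
        else (inside, p1, some c, abas, babs)
      | _, _ => (inside, p1, some c, abas, babs)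

def is_valid_two_alt (string : String) : Bool :=
  match string.toList.foldl bstep (false, none, none, PySem.Set.empty, PySem.Set.empty) with
  | (_, _, _, abas, babs) => abas.any (fun p => PySem.Set.contains babs (p.2, p.1))

-- ===== PRECONDITION & SPEC =====
-- Pre_ excludes exactly the strings on which A raises ValueError: those whose bracket parse
-- (toggle at '[' when outside, at ']' when inside) ends inside an unclosed '['.
def brk (inb : Bool) (c : Char) : Bool := if inb then decide (c ≠ ']') else decide (c = '[')

def Pre_is_valid_two (string : String) : Prop := string.toList.foldl brk false = false
instance (string : String) : Decidable (Pre_is_valid_two string) := by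
  unfold Pre_is_valid_two; infer_instance

def pvWitness_is_valid_two : String := "aba[bab]"

def Spec_is_valid_two (string : String) (out : Bool) : Prop := out = is_valid_two_alt string
instance (string : String) (out : Bool) : Decidable (Spec_is_valid_two string out) := by
  unfold Spec_is_valid_two; infer_instance

-- ===== CLAIM (what is proved, stated in full; the proofs are below) =====
def Claim_equal_is_valid_two : Prop := ∀ (string : String), Dom_is_valid_two string → Pre_is_valid_two string → Spec_is_valid_two string (is_valid_two string)

-- ===== LEMMAS AND PROOFS =====

-- sl1/sl2 = last and second-to-last character (B's (p2, p1) state after a segment)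
def sl1 (xs : List Char) : Option Char := xs.getLast?
def sl2 (xs : List Char) : Option Char := xs.dropLast.getLast?

lemma splitOnMax_go_one (c : Char) : ∀ (fuel : Nat) (l cur : List Char) (acc : List (List Char)),
    l.length < fuel →
    PySem.Chars.splitOnMax.go [c] fuel 1 l cur acc =
      if c ∈ l then
        ((l.dropWhile (· ≠ c)).tail :: (cur.reverse ++ l.takeWhile (· ≠ c)) :: acc).reverse
      else ((cur.reverse ++ l) :: acc).reverse := by
  intro fuel
  induction fuel with
  | zero => intro l cur acc h; omega
  | succ n ih =>
    intro l cur acc h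
    cases l with
    | nil => simp [PySem.Chars.splitOnMax.go]
    | cons x rest =>
      by_cases hx : x = c
      · subst hx
        simp [PySem.Chars.splitOnMax.go, List.isPrefixOf]
        cases n with
        | zero => simp at h
        | succ m =>
          cases rest with
          | nil => simp [PySem.Chars.splitOnMax.go]
          | cons y t => simp [PySem.Chars.splitOnMax.go]
      · have hne : (c == x) = false := by simp; exact fun hh => hx hh.symm
        simp only [List.length_cons] at h
        rw [PySem.Chars.splitOnMax.go]
        simp only [List.isPrefixOf, hne, Bool.false_and, if_neg]
        rw [ih rest (x :: cur) acc (by omega)]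
        have hmem : (c ∈ x :: rest) = (c ∈ rest) := by
          simp [List.mem_cons]
          intro hh; exact absurd hh.symm hx
        by_cases hm : c ∈ rest
        · simp [hm, hx, List.takeWhile_cons, List.dropWhile_cons, Ne.symm hx]
        · have hcx : ¬ c = x := fun hh => absurd hh.symm hx
          have h2 : c ∉ x :: rest := by simp [hm, hcx]
          simp [hm, hcx, h2, List.takeWhile_cons, Ne.symm hx]

lemma splitOnMax_one_of_mem {c : Char} {s : List Char} (h : c ∈ s) :
    PySem.Chars.splitOnMax s [c] 1 = [s.takeWhile (· ≠ c), (s.dropWhile (· ≠ c)).tail] := by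
  unfold PySem.Chars.splitOnMax
  rw [if_neg (by omega)]
  norm_num
  rw [splitOnMax_go_one c (s.length + 1) s [] [] (by omega)]
  simp [h]

lemma splitOnMax_one_of_not_mem {c : Char} {s : List Char} (h : c ∉ s) :
    PySem.Chars.splitOnMax s [c] 1 = [s] := by
  unfold PySem.Chars.splitOnMax
  rw [if_neg (by omega)]
  norm_num
  rw [splitOnMax_go_one c (s.length + 1) s [] [] (by omega)]
  simp [h]

lemma split_decomp {c : Char} {s : List Char} (h : c ∈ s) :
    s = s.takeWhile (· ≠ c) ++ c :: (s.dropWhile (· ≠ c)).tail := by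
  have hne : s.dropWhile (· ≠ c) ≠ [] := by
    simp only [ne_eq, List.dropWhile_eq_nil_iff]
    push_neg
    exact ⟨c, h, by simp⟩
  obtain ⟨d, t', hd⟩ := List.exists_cons_of_ne_nil hne
  have hh := List.head_dropWhile_not (fun x => decide (x ≠ c)) hne
  simp only [hd, List.head_cons, decide_eq_false_iff_not, not_not] at hh
  conv_lhs => rw [← List.takeWhile_append_dropWhile (p := fun x => decide (x ≠ c)) (l := s)]
  rw [hd, hh]
  simp

lemma mem_enumerate {α : Type} (xs : List α) : ∀ (st : Int) (p : Int × α),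
    (p ∈ PySem.List.enumerate xs st ↔ ∃ (k : Nat) (hk : k < xs.length), p = (st + k, xs[k])) := by
  induction xs with
  | nil => simp [PySem.List.enumerate_nil]
  | cons x t ih =>
    intro st p
    rw [PySem.List.enumerate_cons]
    simp only [List.mem_cons, ih]
    constructor
    · rintro (rfl | ⟨k, hk, rfl⟩)
      · exact ⟨0, by simp⟩
      · exact ⟨k + 1, by simp [hk], by simp; push_cast; ring_nf⟩
    · rintro ⟨k, hk, rfl⟩
      cases k with
      | zero => left; simp
      | succ m =>
        right; refine ⟨m, by simpa using hk, ?_⟩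
        simp; push_cast; ring_nf

lemma pyGetD_nat (s : List Char) (i : Nat) (h : i < s.length) :
    PySem.List.pyGetD s (i : Int) ' ' = s[i] := by
  rw [PySem.List.pyGetD_natCast]
  exact List.getD_eq_getElem s ' ' h

lemma drop_take_three {s : List Char} {k : Nat} (h : k + 2 < s.length) :
    (s.drop k).take 3 = [s[k], s[k+1], s[k+2]] := by
  apply List.ext_getElem
  · simp; omega
  · intro i hi hi2
    simp only [List.getElem_take, List.getElem_drop]
    simp at hi2
    interval_cases i <;> simp

lemma aba_infix_iff (a b : Char) (s : List Char) :
    [a, b, a] <:+: s ↔ ∃ (k : Nat) (h : k + 2 < s.length), s[k] = a ∧ s[k+1] = b ∧ s[k+2] = a := by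
  constructor
  · rintro ⟨pre, suf, rfl⟩
    refine ⟨pre.length, by simp only [List.length_append, List.length_cons]; omega, ?_, ?_, ?_⟩
    · simp [List.getElem_append]
    · simp [List.getElem_append]
    · simp [List.getElem_append]
  · rintro ⟨k, h, ha, hb, ha2⟩
    refine ⟨s.take k, s.drop (k + 3), ?_⟩
    have h3 : s.drop k = [a, b, a] ++ s.drop (k + 3) := by
      conv_lhs => rw [← List.take_append_drop 3 (s.drop k)]
      rw [drop_take_three h, ha, hb, ha2, List.drop_drop]
    conv_rhs => rw [← List.take_append_drop k s, h3]
    simp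

lemma mem_faa (t s : List Char) :
    t ∈ find_all_abas s ↔ ∃ a b, a ≠ b ∧ t = [a, b, a] ∧ [a, b, a] <:+: s := by
  unfold find_all_abas
  rw [List.mem_filterMap]
  rw [PySem.List.slice_to_neg_ofNat s 2 (by norm_num)]
  constructor
  · rintro ⟨p, hp, hsome⟩
    rw [mem_enumerate] at hp
    obtain ⟨k, hk, rfl⟩ := hp
    simp only [List.length_take] at hk
    have hk2 : k + 2 < s.length := by omega
    have hx : (s.take (s.length - 2))[k] = s[k]'(by omega) := List.getElem_take
    dsimp only at hsome
    simp only [zero_add, hx] at hsome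
    split_ifs at hsome with hcond
    · obtain ⟨h1, h2⟩ := hcond
      have e2 : ((k : Int) + 2) = ((k + 2 : Nat) : Int) := by push_cast; ring
      have e1 : ((k : Int) + 1) = ((k + 1 : Nat) : Int) := by push_cast; ring
      have e3 : ((k : Int) + 3) = ((k : Nat) : Int) + ((3 : Nat) : Int) := by push_cast; ring
      rw [e2, pyGetD_nat s _ hk2] at h1
      rw [e1, pyGetD_nat s _ (by omega)] at h2
      rw [e3, PySem.List.slice_natCast_add] at hsome
      rw [drop_take_three hk2] at hsome
      refine ⟨s[k]'(by omega), s[k+1], h2, ?_, ?_⟩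
      · rw [← Option.some_inj.mp hsome, h1]
      · rw [aba_infix_iff]
        exact ⟨k, hk2, rfl, rfl, h1⟩
  · rintro ⟨a, b, hab, rfl, hinf⟩
    rw [aba_infix_iff] at hinf
    obtain ⟨k, hk2, ha, hb, ha2⟩ := hinf
    refine ⟨((k : Int), s[k]'(by omega)), ?_, ?_⟩
    · rw [mem_enumerate]
      refine ⟨k, by simp; omega, ?_⟩
      simp only [zero_add]
      congr 1
      exact (List.getElem_take).symm
    · dsimp only
      have e2 : ((k : Int) + 2) = ((k + 2 : Nat) : Int) := by push_cast; ring
      have e1 : ((k : Int) + 1) = ((k + 1 : Nat) : Int) := by push_cast; ring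
      have e3 : ((k : Int) + 3) = ((k : Nat) : Int) + ((3 : Nat) : Int) := by push_cast; ring
      rw [e2, pyGetD_nat s _ hk2, e1, pyGetD_nat s _ (by omega), e3, PySem.List.slice_natCast_add,
          drop_take_three hk2, ha, hb, ha2]
      rw [if_pos ⟨rfl, hab⟩]

lemma snoc_of_getLast? {b : Char} {xs : List Char} (h : xs.getLast? = some b) :
    xs = xs.dropLast ++ [b] := by
  have hne : xs ≠ [] := by rintro rfl; simp at h
  have hb : xs.getLast hne = b := by
    have := List.getLast?_eq_getLast (l := xs) hne
    rw [h] at this; exact (Option.some_inj.mp this).symm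
  rw [← hb]
  exact (List.dropLast_append_getLast hne).symm

lemma suffix_two_iff (a b : Char) (xs : List Char) :
    [a, b] <:+ xs ↔ sl2 xs = some a ∧ sl1 xs = some b := by
  constructor
  · rintro ⟨pre, rfl⟩
    constructor
    · show (pre ++ [a, b]).dropLast.getLast? = some a
      rw [show pre ++ [a, b] = (pre ++ [a]) ++ [b] by simp, List.dropLast_concat]
      simp
    · show (pre ++ [a, b]).getLast? = some b
      simp
  · rintro ⟨h2, h1⟩
    have hx := snoc_of_getLast? h1
    have hy := snoc_of_getLast? h2
    refine ⟨xs.dropLast.dropLast, ?_⟩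
    conv_rhs => rw [hx, hy]
    simp

lemma aba_snoc (a b c : Char) (xs : List Char) :
    [a, b, a] <:+: xs ++ [c] ↔ [a, b, a] <:+: xs ∨ (c = a ∧ [a, b] <:+ xs) := by
  constructor
  · rintro ⟨pre, suf, hsuf⟩
    rcases List.eq_nil_or_concat suf with rfl | ⟨suf', c', rfl⟩
    · have h1 : xs ++ [c] = (pre ++ [a, b]) ++ [a] := by simpa using hsuf.symm
      have h2 := List.append_inj' h1 rfl
      have hc : c = a := by simpa using h2.2
      exact Or.inr ⟨hc, ⟨pre, h2.1.symm⟩⟩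
    · have h1 : xs ++ [c] = (pre ++ ([a, b, a] ++ suf')) ++ [c'] := by
        simpa [List.concat_eq_append, List.append_assoc] using hsuf.symm
      have h2 := List.append_inj' h1 rfl
      exact Or.inl ⟨pre, suf', by rw [h2.1]; simp⟩
  · rintro (⟨pre, suf, rfl⟩ | ⟨rfl, pre, rfl⟩)
    · exact ⟨pre, suf ++ [c], by simp⟩
    · exact ⟨pre, [], by simp⟩

lemma sl1_snoc (xs : List Char) (c : Char) : sl1 (xs ++ [c]) = some c := by
  simp [sl1]

lemma sl2_snoc (xs : List Char) (c : Char) : sl2 (xs ++ [c]) = sl1 xs := by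
  simp [sl2, sl1, List.dropLast_concat]

lemma bstep_out (ctx : List Char) (c : Char) (A B : PySem.Set (Char × Char))
    (P : Char → Char → Prop) (hc : c ≠ '[')
    (hA : ∀ a b, ((a, b) ∈ A) ↔ P a b ∨ (a ≠ b ∧ [a, b, a] <:+: ctx)) :
    ∃ A1, bstep (false, sl2 ctx, sl1 ctx, A, B) c = (false, sl2 (ctx ++ [c]), sl1 (ctx ++ [c]), A1, B)
      ∧ ∀ a b, ((a, b) ∈ A1) ↔ P a b ∨ (a ≠ b ∧ [a, b, a] <:+: (ctx ++ [c])) := by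
  rw [sl1_snoc, sl2_snoc]
  have nosuf : ∀ x y : Char, (sl2 ctx = none ∨ sl1 ctx = none) → ¬ [x, y] <:+ ctx := by
    intro x y h hs
    rw [suffix_two_iff] at hs
    rcases h with h | h <;> rw [h] at hs <;> simp at hs
  rcases e2 : sl2 ctx with _ | a <;> rcases e1 : sl1 ctx with _ | b
  · exact ⟨A, by simp [bstep, hc], fun x y => by
      rw [hA x y, aba_snoc]
      have := nosuf x y (Or.inl e2); tauto⟩
  · exact ⟨A, by simp [bstep, hc], fun x y => by
      rw [hA x y, aba_snoc]
      have := nosuf x y (Or.inl e2); tauto⟩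
  · exact ⟨A, by simp [bstep, hc], fun x y => by
      rw [hA x y, aba_snoc]
      have := nosuf x y (Or.inr e1); tauto⟩
  · by_cases htrip : a = c ∧ a ≠ b
    · obtain ⟨rfl, hab⟩ := htrip
      refine ⟨PySem.Set.add A (a, b), ?_, ?_⟩
      · simp [bstep, hc, hab]
      · intro x y
        rw [PySem.Set.mem_add, hA x y, aba_snoc, suffix_two_iff, e1, e2]
        constructor
        · rintro (h | h)
          · tauto
          · simp only [Prod.mk.injEq] at h
            obtain ⟨rfl, rfl⟩ := h
            exact Or.inr ⟨hab, Or.inr ⟨rfl, rfl, rfl⟩⟩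
        · rintro (h | ⟨hxy, h | ⟨rfl, hx, hy⟩⟩)
          · tauto
          · tauto
          · simp only [Option.some_inj] at hx hy
            subst hy
            simp
    · refine ⟨A, ?_, ?_⟩
      · have hff : (a == c && a != b) = false := by
          by_cases hac : a = c
          · have hb : a = b := by tauto
            simp [hb]
          · simp [hac]
        simp [bstep, hc, hff]
      · intro x y
        rw [hA x y, aba_snoc, suffix_two_iff, e1, e2]
        constructor
        · tauto
        · rintro (h | ⟨hxy, h | ⟨rfl, hx, hy⟩⟩)
          · tauto
          · tauto
          · simp only [Option.some_inj] at hx hy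
            subst hx; subst hy
            exact absurd ⟨rfl, hxy⟩ htrip

lemma scan_out (l : List Char) : ∀ (ctx : List Char) (A B : PySem.Set (Char × Char))
    (P : Char → Char → Prop),
    '[' ∉ l →
    (∀ a b, ((a, b) ∈ A) ↔ P a b ∨ (a ≠ b ∧ [a, b, a] <:+: ctx)) →
    ∃ A', List.foldl bstep (false, sl2 ctx, sl1 ctx, A, B) l
        = (false, sl2 (ctx ++ l), sl1 (ctx ++ l), A', B)
      ∧ ∀ a b, ((a, b) ∈ A') ↔ P a b ∨ (a ≠ b ∧ [a, b, a] <:+: (ctx ++ l)) := by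
  induction l with
  | nil => exact fun ctx A B P _ hA => ⟨A, by simp, by simpa using hA⟩
  | cons c t ih =>
    intro ctx A B P hno hA
    have hc : c ≠ '[' := fun h => hno (h ▸ List.mem_cons_self ..)
    obtain ⟨A1, hstep, hA1⟩ := bstep_out ctx c A B P hc hA
    rw [List.foldl_cons, hstep]
    obtain ⟨A', hfold, hA'⟩ := ih (ctx ++ [c]) A1 B P (fun h => hno (List.mem_cons_of_mem _ h)) hA1
    exact ⟨A', by rw [hfold]; simp, by simpa using hA'⟩

lemma bstep_in (ctx : List Char) (c : Char) (A B : PySem.Set (Char × Char))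
    (Q : Char → Char → Prop) (hc : c ≠ ']')
    (hB : ∀ a b, ((a, b) ∈ B) ↔ Q a b ∨ (a ≠ b ∧ [a, b, a] <:+: ctx)) :
    ∃ B1, bstep (true, sl2 ctx, sl1 ctx, A, B) c = (true, sl2 (ctx ++ [c]), sl1 (ctx ++ [c]), A, B1)
      ∧ ∀ a b, ((a, b) ∈ B1) ↔ Q a b ∨ (a ≠ b ∧ [a, b, a] <:+: (ctx ++ [c])) := by
  rw [sl1_snoc, sl2_snoc]
  have nosuf : ∀ x y : Char, (sl2 ctx = none ∨ sl1 ctx = none) → ¬ [x, y] <:+ ctx := by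
    intro x y h hs
    rw [suffix_two_iff] at hs
    rcases h with h | h <;> rw [h] at hs <;> simp at hs
  rcases e2 : sl2 ctx with _ | a <;> rcases e1 : sl1 ctx with _ | b
  · exact ⟨B, by simp [bstep, hc], fun x y => by
      rw [hB x y, aba_snoc]
      have := nosuf x y (Or.inl e2); tauto⟩
  · exact ⟨B, by simp [bstep, hc], fun x y => by
      rw [hB x y, aba_snoc]
      have := nosuf x y (Or.inl e2); tauto⟩
  · exact ⟨B, by simp [bstep, hc], fun x y => by
      rw [hB x y, aba_snoc]
      have := nosuf x y (Or.inr e1); tauto⟩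
  · by_cases htrip : a = c ∧ a ≠ b
    · obtain ⟨rfl, hab⟩ := htrip
      refine ⟨PySem.Set.add B (a, b), ?_, ?_⟩
      · simp [bstep, hc, hab]
      · intro x y
        rw [PySem.Set.mem_add, hB x y, aba_snoc, suffix_two_iff, e1, e2]
        constructor
        · rintro (h | h)
          · tauto
          · simp only [Prod.mk.injEq] at h
            obtain ⟨rfl, rfl⟩ := h
            exact Or.inr ⟨hab, Or.inr ⟨rfl, rfl, rfl⟩⟩
        · rintro (h | ⟨hxy, h | ⟨rfl, hx, hy⟩⟩)
          · tauto
          · tauto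
          · simp only [Option.some_inj] at hx hy
            subst hy
            simp
    · refine ⟨B, ?_, ?_⟩
      · have hff : (a == c && a != b) = false := by
          by_cases hac : a = c
          · have hb : a = b := by tauto
            simp [hb]
          · simp [hac]
        simp [bstep, hc, hff]
      · intro x y
        rw [hB x y, aba_snoc, suffix_two_iff, e1, e2]
        constructor
        · tauto
        · rintro (h | ⟨hxy, h | ⟨rfl, hx, hy⟩⟩)
          · tauto
          · tauto
          · simp only [Option.some_inj] at hx hy
            subst hx; subst hy
            exact absurd ⟨rfl, hxy⟩ htrip

lemma scan_in (l : List Char) : ∀ (ctx : List Char) (A B : PySem.Set (Char × Char))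
    (Q : Char → Char → Prop),
    ']' ∉ l →
    (∀ a b, ((a, b) ∈ B) ↔ Q a b ∨ (a ≠ b ∧ [a, b, a] <:+: ctx)) →
    ∃ B', List.foldl bstep (true, sl2 ctx, sl1 ctx, A, B) l
        = (true, sl2 (ctx ++ l), sl1 (ctx ++ l), A, B')
      ∧ ∀ a b, ((a, b) ∈ B') ↔ Q a b ∨ (a ≠ b ∧ [a, b, a] <:+: (ctx ++ l)) := by
  induction l with
  | nil => exact fun ctx A B Q _ hB => ⟨B, by simp, by simpa using hB⟩
  | cons c t ih =>
    intro ctx A B Q hno hB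
    have hc : c ≠ ']' := fun h => hno (h ▸ List.mem_cons_self ..)
    obtain ⟨B1, hstep, hB1⟩ := bstep_in ctx c A B Q hc hB
    rw [List.foldl_cons, hstep]
    obtain ⟨B', hfold, hB'⟩ := ih (ctx ++ [c]) A B1 Q (fun h => hno (List.mem_cons_of_mem _ h)) hB1
    exact ⟨B', by rw [hfold]; simp, by simpa using hB'⟩

lemma main_scan : ∀ (fuel : Nat) (s : List Char) (outs ins : List (List Char))
    (A B : PySem.Set (Char × Char)) (P Q : Char → Char → Prop),
    s.length < fuel →
    separateGo fuel s = some (outs, ins) →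
    (∀ a b, ((a, b) ∈ A) ↔ P a b) →
    (∀ a b, ((a, b) ∈ B) ↔ Q a b) →
    ∃ A' B' o2 o1, List.foldl bstep (false, none, none, A, B) s = (false, o2, o1, A', B')
      ∧ (∀ a b, ((a, b) ∈ A') ↔ P a b ∨ (a ≠ b ∧ ∃ o ∈ outs, [a, b, a] <:+: o))
      ∧ (∀ a b, ((a, b) ∈ B') ↔ Q a b ∨ (a ≠ b ∧ ∃ i ∈ ins, [a, b, a] <:+: i)) := by
  intro fuel
  induction fuel with
  | zero => intro s _ _ _ _ _ _ h; omega
  | succ n ih =>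
    intro s outs ins A B P Q hlen hsep hA hB
    rw [separateGo] at hsep
    by_cases hin : '[' ∈ s
    · rw [if_pos (by rw [PySem.Chars.isIn_iff_infix]; exact (List.singleton_infix_iff _ _).mpr hin)] at hsep
      rw [splitOnMax_one_of_mem hin] at hsep
      dsimp only at hsep
      set t := s.takeWhile (· ≠ '[') with ht
      set r := (s.dropWhile (· ≠ '[')).tail with hr
      have hsdec : s = t ++ '[' :: r := split_decomp hin
      by_cases hrin : ']' ∈ r
      · rw [splitOnMax_one_of_mem hrin] at hsep
        dsimp only at hsep
        set u := r.takeWhile (· ≠ ']') with hu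
        set s' := (r.dropWhile (· ≠ ']')).tail with hs'
        have hrdec : r = u ++ ']' :: s' := split_decomp hrin
        cases hgo : separateGo n s' with
        | none => rw [hgo] at hsep; simp at hsep
        | some oi =>
          rw [hgo] at hsep
          simp only [Option.map_some, Option.some_inj] at hsep
          obtain ⟨houts, hins⟩ : outs = t :: oi.1 ∧ ins = u :: oi.2 := by
            cases hsep; exact ⟨rfl, rfl⟩
          -- fold decomposition
          have hnt : '[' ∉ t := fun hmem => by
            have := List.mem_takeWhile_imp hmem; simp at this
          have hnu : ']' ∉ u := fun hmem => by
            have := List.mem_takeWhile_imp hmem; simp at this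
          obtain ⟨A1, hf1, hA1⟩ := scan_out t [] A B P hnt (by
            intro a b; rw [hA a b]; simp)
          obtain ⟨B1, hf2, hB1⟩ := scan_in u [] A1 B Q hnu (by
            intro a b; rw [hB a b]; simp)
          have hlen' : s'.length < n := by
            have : s.length = t.length + 1 + u.length + 1 + s'.length := by
              rw [hsdec, hrdec]; simp; omega
            omega
          obtain ⟨A', B', o2, o1, hf3, hA', hB'⟩ :=
            ih s' oi.1 oi.2 A1 B1
              (fun a b => P a b ∨ (a ≠ b ∧ [a, b, a] <:+: t))
              (fun a b => Q a b ∨ (a ≠ b ∧ [a, b, a] <:+: u))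
              hlen' (by rw [hgo]) (by intro a b; rw [hA1 a b]; simp) (by intro a b; rw [hB1 a b]; simp)
          refine ⟨A', B', o2, o1, ?_, ?_, ?_⟩
          · rw [hsdec, hrdec]
            rw [List.foldl_append]
            have e0 : (false, (none : Option Char), (none : Option Char), A, B)
                = (false, sl2 [], sl1 [], A, B) := by simp [sl1, sl2]
            rw [e0, hf1]
            rw [List.foldl_cons]
            have estep : bstep (false, sl2 ([] ++ t), sl1 ([] ++ t), A1, B) '['
                = (true, none, none, A1, B) := by simp [bstep]
            rw [estep, List.foldl_append]
            have e1 : (true, (none : Option Char), (none : Option Char), A1, B)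
                = (true, sl2 [], sl1 [], A1, B) := by simp [sl1, sl2]
            rw [e1, hf2, List.foldl_cons]
            have estep2 : bstep (true, sl2 ([] ++ u), sl1 ([] ++ u), A1, B1) ']'
                = (false, none, none, A1, B1) := by simp [bstep]
            rw [estep2, hf3]
          · intro a b
            rw [hA' a b, houts]
            simp only [List.mem_cons]
            constructor
            · rintro ((h | ⟨hab, h⟩) | ⟨hab, o, ho, hio⟩)
              · tauto
              · exact Or.inr ⟨hab, t, Or.inl rfl, h⟩
              · exact Or.inr ⟨hab, o, Or.inr ho, hio⟩
            · rintro (h | ⟨hab, o, (rfl | ho), hio⟩)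
              · tauto
              · tauto
              · exact Or.inr ⟨hab, o, ho, hio⟩
          · intro a b
            rw [hB' a b, hins]
            simp only [List.mem_cons]
            constructor
            · rintro ((h | ⟨hab, h⟩) | ⟨hab, i, hi, hio⟩)
              · tauto
              · exact Or.inr ⟨hab, u, Or.inl rfl, h⟩
              · exact Or.inr ⟨hab, i, Or.inr hi, hio⟩
            · rintro (h | ⟨hab, i, (rfl | hi), hio⟩)
              · tauto
              · tauto
              · exact Or.inr ⟨hab, i, hi, hio⟩
      · rw [splitOnMax_one_of_not_mem hrin] at hsep
        dsimp only at hsep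
        simp at hsep
    · rw [if_neg (by rw [PySem.Chars.isIn_iff_infix]; simpa using (fun h => hin ((List.singleton_infix_iff _ _).mp h)))] at hsep
      simp only [Option.some_inj] at hsep
      obtain ⟨houts, hins⟩ : outs = [s] ∧ ins = [] := by cases hsep; exact ⟨rfl, rfl⟩
      obtain ⟨A', hf, hA'⟩ := scan_out s [] A B P hin (by intro a b; rw [hA a b]; simp)
      refine ⟨A', B, sl2 ([] ++ s), sl1 ([] ++ s), ?_, ?_, ?_⟩
      · have e0 : (false, (none : Option Char), (none : Option Char), A, B)
            = (false, sl2 [], sl1 [], A, B) := by simp [sl1, sl2]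
        rw [e0, hf]
      · intro a b
        rw [hA' a b, houts]
        simp
      · intro a b
        rw [hB a b, hins]
        simp

lemma brk_false_of_no_open {t : List Char} (h : '[' ∉ t) :
    List.foldl brk false t = false := by
  induction t with
  | nil => rfl
  | cons c r ih =>
    have hc : c ≠ '[' := fun hh => h (hh ▸ List.mem_cons_self ..)
    rw [List.foldl_cons]
    have hb : brk false c = false := by simp [brk, hc]
    rw [hb]
    exact ih (fun hh => h (List.mem_cons_of_mem _ hh))

lemma brk_true_of_no_close {u : List Char} (h : ']' ∉ u) :
    List.foldl brk true u = true := by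
  induction u with
  | nil => rfl
  | cons c r ih =>
    have hc : c ≠ ']' := fun hh => h (hh ▸ List.mem_cons_self ..)
    rw [List.foldl_cons]
    have hb : brk true c = true := by simp [brk, hc]
    rw [hb]
    exact ih (fun hh => h (List.mem_cons_of_mem _ hh))

lemma separate_isSome : ∀ (fuel : Nat) (s : List Char), s.length < fuel →
    List.foldl brk false s = false → (separateGo fuel s).isSome := by
  intro fuel
  induction fuel with
  | zero => intro s h; omega
  | succ n ih =>
    intro s hlen hpre
    rw [separateGo]
    by_cases hin : '[' ∈ s
    · rw [if_pos (by rw [PySem.Chars.isIn_iff_infix]; exact (List.singleton_infix_iff _ _).mpr hin)]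
      rw [splitOnMax_one_of_mem hin]
      dsimp only
      set t := s.takeWhile (· ≠ '[') with ht
      set r := (s.dropWhile (· ≠ '[')).tail with hr
      have hsdec : s = t ++ '[' :: r := split_decomp hin
      have hnt : '[' ∉ t := fun hmem => by
        have := List.mem_takeWhile_imp hmem; simp at this
      have hpre2 : List.foldl brk true r = false := by
        rw [hsdec, List.foldl_append, brk_false_of_no_open hnt, List.foldl_cons] at hpre
        have hb : brk false '[' = true := by simp [brk]
        rw [hb] at hpre
        exact hpre
      by_cases hrin : ']' ∈ r
      · rw [splitOnMax_one_of_mem hrin]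
        dsimp only
        set u := r.takeWhile (· ≠ ']') with hu
        set s' := (r.dropWhile (· ≠ ']')).tail with hs'
        have hrdec : r = u ++ ']' :: s' := split_decomp hrin
        have hnu : ']' ∉ u := fun hmem => by
          have := List.mem_takeWhile_imp hmem; simp at this
        have hpre3 : List.foldl brk false s' = false := by
          rw [hrdec, List.foldl_append, brk_true_of_no_close hnu, List.foldl_cons] at hpre2
          have hb : brk true ']' = false := by simp [brk]
          rw [hb] at hpre2
          exact hpre2
        have hlen1 : s.length = t.length + 1 + r.length := by rw [hsdec]; simp; omega
        have hlen2 : r.length = u.length + 1 + s'.length := by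
          conv_lhs => rw [hrdec]
          simp
          omega
        have hlen' : s'.length < n := by omega
        have hsome := ih s' hlen' hpre3
        cases hgo : separateGo n s' with
        | none => rw [hgo] at hsome; simp at hsome
        | some oi => simp [hgo]
      · exfalso
        rw [brk_true_of_no_close hrin] at hpre2
        exact absurd hpre2 (by simp)
    · rw [if_neg (by rw [PySem.Chars.isIn_iff_infix]; simpa using (fun h => hin ((List.singleton_infix_iff _ _).mp h)))]
      simp

lemma mem_foldl_update (segs : List (List Char)) : ∀ (acc : PySem.Set (List Char)) (t : List Char),
    (t ∈ segs.foldl (fun acc o => PySem.Set.update acc (find_all_abas o)) acc) ↔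
      t ∈ acc ∨ ∃ o ∈ segs, t ∈ find_all_abas o := by
  induction segs with
  | nil => intro acc t; simp
  | cons o os ih =>
    intro acc t
    rw [List.foldl_cons, ih, PySem.Set.mem_update]
    simp only [List.mem_cons]
    constructor
    · rintro ((h | h) | ⟨o', ho', h⟩)
      · tauto
      · exact Or.inr ⟨o, Or.inl rfl, h⟩
      · exact Or.inr ⟨o', Or.inr ho', h⟩
    · rintro (h | ⟨o', (rfl | ho'), h⟩)
      · tauto
      · tauto
      · exact Or.inr ⟨o', ho', h⟩

lemma pyreverse_aba (a b : Char) : pyreverse [a, b, a] = [b, a, b] := rfl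

-- ===== VERDICT (by name: the statement is the Claim_ definition above) =====
theorem is_valid_two_spec : Claim_equal_is_valid_two := by
  intro string _ hpre
  unfold Spec_is_valid_two
  unfold Pre_is_valid_two at hpre
  set s := string.toList with hs
  have hsome := separate_isSome (s.length + 1) s (by omega) hpre
  cases hsep : separateGo (s.length + 1) s with
  | none => rw [hsep] at hsome; simp at hsome
  | some oi =>
    obtain ⟨outs, ins⟩ := oi
    obtain ⟨A', B', o2, o1, hfold, hA', hB'⟩ :=
      main_scan (s.length + 1) s outs ins PySem.Set.empty PySem.Set.empty
        (fun _ _ => False) (fun _ _ => False) (by omega) hsep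
        (by intro a b; simp [PySem.Set.empty]) (by intro a b; simp [PySem.Set.empty])
    unfold is_valid_two is_valid_two_alt
    rw [← hs, separate, hsep, hfold]
    dsimp only
    rw [Bool.eq_iff_iff]
    constructor
    · intro hA
      split_ifs at hA with hne
      rw [List.any_eq_true]
      obtain ⟨x, hx⟩ := List.exists_mem_of_ne_nil _ hne
      rw [PySem.Set.mem_inter, PySem.Set.mem_ofList, List.mem_map] at hx
      obtain ⟨⟨u, hu, rfl⟩, hxb⟩ := hx
      rw [mem_foldl_update] at hu
      rcases hu with h | ⟨o, ho, hu⟩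
      · simp [PySem.Set.empty] at h
      rw [mem_faa] at hu
      obtain ⟨a, b, hab, rfl, hinf⟩ := hu
      rw [pyreverse_aba, mem_foldl_update] at hxb
      rcases hxb with h | ⟨i, hi, hbab⟩
      · simp [PySem.Set.empty] at h
      rw [mem_faa] at hbab
      obtain ⟨a', b', hab', heq, hinf'⟩ := hbab
      simp only [List.cons.injEq, and_true] at heq
      obtain ⟨rfl, rfl, _⟩ := heq
      refine ⟨(a, b), ?_, ?_⟩
      · rw [hA' a b]; exact Or.inr ⟨hab, o, ho, hinf⟩
      · rw [PySem.Set.contains_iff, hB' b a]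
        exact Or.inr ⟨hab', i, hi, hinf'⟩
    · intro hB
      rw [List.any_eq_true] at hB
      obtain ⟨⟨a, b⟩, hpA, hpB⟩ := hB
      rw [hA' a b] at hpA
      rcases hpA with h | ⟨hab, o, ho, hinf⟩
      · exact absurd h not_false
      rw [PySem.Set.contains_iff, hB' b a] at hpB
      rcases hpB with h | ⟨hba, i, hi, hinf'⟩
      · exact absurd h not_false
      have hmem : pyreverse [a, b, a] ∈
          ins.foldl (fun acc i => PySem.Set.update acc (find_all_abas i)) PySem.Set.empty := by
        rw [pyreverse_aba, mem_foldl_update]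
        exact Or.inr ⟨i, hi, (mem_faa _ _).mpr ⟨b, a, hba, rfl, hinf'⟩⟩
      have hmemA : [a, b, a] ∈
          outs.foldl (fun acc o => PySem.Set.update acc (find_all_abas o)) PySem.Set.empty := by
        rw [mem_foldl_update]
        exact Or.inr ⟨o, ho, (mem_faa _ _).mpr ⟨a, b, hab, rfl, hinf⟩⟩
      have hne : PySem.Set.inter (PySem.Set.ofList
            ((outs.foldl (fun acc o => PySem.Set.update acc (find_all_abas o)) PySem.Set.empty).map pyreverse))
          (ins.foldl (fun acc i => PySem.Set.update acc (find_all_abas i)) PySem.Set.empty) ≠ [] := by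
        intro hnil
        have hfalse : pyreverse [a, b, a] ∈ ([] : List (List Char)) := by
          rw [← hnil, PySem.Set.mem_inter, PySem.Set.mem_ofList, List.mem_map]
          exact ⟨⟨[a, b, a], hmemA, rfl⟩, hmem⟩
        simp at hfalse
      rw [if_neg hne]
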